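-- pv_equiv track=rewrite | github.com/bros-bioinfo/bros-bioinfo.github.io | COURS/M1/SEMESTRE1/ALGO_PROG/ALGO/Eliot/exe_2.py | obtenir_valeur
-- ===== SOURCE A (Python) =====
-- def creer_pile():  # Renvoie une nouvelle  pile vide.
--     return []
--
-- def empiler(p, e):  # Empile  l ’ élément ’ e ’ dans  la  pile ’P’.
--     p.append(e)
--
-- def depiler(p):  # Dépile un élément de la pile ’P’ et renvoie cet élément .
--     return p.pop()
--
-- def obtenir_valeur(dico, key):
--     n = depiler(dico)
--     tmp_key = creer_pile()
--     tmp_value = creer_pile()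
--     out = None
--     k = 0
--     for i in range(n):  # Transfert le dico dans tmp_key et tmp_value jusque à atteindre la clé recherchée
--         cle = depiler(dico)
--         valeur = depiler(dico)
--         empiler(tmp_key, cle)
--         empiler(tmp_value, valeur)
--         k += 1
--         if cle == key:
--             out = valeur
--             break
--     for i in range(k):  # Reremplie le dico avec les valeurs contenues dans tmp_key et tmp_value
--         empiler(dico, depiler(tmp_value))
--         empiler(dico, depiler(tmp_key))
--     empiler(dico, n)
--     return out
-- ===== SOURCE B (Python) =====
-- def obtenir_valeur(dico, key):
--     # Non-destructive indexed scan of the stack encoding, top-down,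
--     # in the same order A pops: never mutates dico.
--     n = dico[-1]
--     for i in range(n):
--         if dico[-2 - 2 * i] == key:
--             return dico[-3 - 2 * i]
--     return None
-- ===== Notes on version B (the rewrite author's own statement) =====
-- stated objective: simpler
-- what changed: Replaces A's destructive pop-into-two-temporary-stacks-then-restore traversal with a direct non-mutating indexed scan of the list (reads dico[-2-2i]/dico[-3-2i] for i in range(n)), maintaining no auxiliary state.
import Mathlib
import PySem

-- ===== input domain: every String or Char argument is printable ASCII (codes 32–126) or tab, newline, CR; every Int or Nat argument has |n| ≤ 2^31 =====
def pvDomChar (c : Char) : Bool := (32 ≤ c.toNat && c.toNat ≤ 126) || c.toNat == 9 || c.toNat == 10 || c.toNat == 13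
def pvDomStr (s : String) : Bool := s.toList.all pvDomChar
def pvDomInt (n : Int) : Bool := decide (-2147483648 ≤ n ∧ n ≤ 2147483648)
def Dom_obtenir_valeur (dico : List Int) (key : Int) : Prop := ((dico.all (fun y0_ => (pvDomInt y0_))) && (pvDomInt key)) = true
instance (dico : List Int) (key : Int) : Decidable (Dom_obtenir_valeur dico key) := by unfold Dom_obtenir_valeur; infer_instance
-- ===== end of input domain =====

-- B replaces A's destructive pop-into-two-temp-stacks-then-restore traversal with a
-- non-mutating indexed scan of the same list (objective: simpler). A mutates dico in
-- place but fully restores it before returning; only the RETURN value is claimed here.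

-- ===== PORT A =====
-- A's first loop ('for i in range(n)'): pops cle then valeur off the stack, pushes them
-- onto tmp_key/tmp_value, breaks with out = valeur on a match. range(n) runs n.toNat
-- times (empty for n ≤ 0, exactly as Python). A pop from an empty list is Python's
-- IndexError: the port returns none there (outside Pre_). The second ('restore') loop
-- and the counter k only rebuild dico and never touch the return value; tmp_key/tmp_value
-- are carried faithfully but, like in Python, do not feed the result.
def obtenirLoopA (key : Int) : Nat → List Int → List Int → List Int → Option Int
  | 0, _, _, _ => none
  | m + 1, p, tmp_key, tmp_value =>
    match PySem.List.pop? p with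
    | none => none
    | some (cle, p1) =>
      match PySem.List.pop? p1 with
      | none => none
      | some (valeur, p2) =>
        if cle = key then some valeur
        else obtenirLoopA key m p2 (tmp_key ++ [cle]) (tmp_value ++ [valeur])

def obtenir_valeur (dico : List Int) (key : Int) : Option Int :=
  match PySem.List.pop? dico with          -- n = depiler(dico)
  | none => none                           -- IndexError on empty dico (outside Pre_)
  | some (n, rest) => obtenirLoopA key n.toNat rest [] []

-- ===== PORT B =====
-- B's loop: 'for i in range(n): if dico[-2-2*i] == key: return dico[-3-2*i]'.
-- An out-of-range index is Python's IndexError: the port returns none there.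
def obtenirLoopB (dico : List Int) (key : Int) : Nat → Nat → Option Int
  | 0, _ => none
  | m + 1, i =>
    match PySem.List.pyGet? dico (-2 - 2 * (i : Int)) with
    | none => none
    | some cle =>
      if cle = key then PySem.List.pyGet? dico (-3 - 2 * (i : Int))
      else obtenirLoopB dico key m (i + 1)

def obtenir_valeur_alt (dico : List Int) (key : Int) : Option Int :=
  match PySem.List.pyGet? dico (-1) with   -- n = dico[-1]
  | none => none                           -- IndexError on empty dico (outside Pre_)
  | some n => obtenirLoopB dico key n.toNat 0

-- ===== PRECONDITION & SPEC =====
-- Pre_ is exactly the set of inputs on which Python A returns (no IndexError): dico is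
-- nonempty and either the popped count n fits in the remaining elements (2n ≤ len-1),
-- or the key occurs at some scanned position i < n whose key AND value both exist.
def Pre_obtenir_valeur (dico : List Int) (key : Int) : Prop :=
  dico ≠ [] ∧
  (2 * dico.getLastD 0 ≤ (dico.length : Int) - 1 ∨
   ∃ i < dico.length, (i : Int) < dico.getLastD 0 ∧ 2 * i + 3 ≤ dico.length ∧
     dico[dico.length - 2 - 2 * i]? = some key)
instance (dico : List Int) (key : Int) : Decidable (Pre_obtenir_valeur dico key) := by
  unfold Pre_obtenir_valeur; infer_instance

def pvWitness_obtenir_valeur : List Int × Int := ([9, 2, 1], 2)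

def Spec_obtenir_valeur (dico : List Int) (key : Int) (out : Option Int) : Prop := out = obtenir_valeur_alt dico key
instance (dico : List Int) (key : Int) (out : Option Int) : Decidable (Spec_obtenir_valeur dico key out) := by unfold Spec_obtenir_valeur; infer_instance

-- ===== CLAIM (what is proved, stated in full; the proofs are below) =====
def Claim_equal_obtenir_valeur : Prop := ∀ (dico : List Int) (key : Int), Dom_obtenir_valeur dico key → Pre_obtenir_valeur dico key → Spec_obtenir_valeur dico key (obtenir_valeur dico key)

-- ===== LEMMAS AND PROOFS =====

theorem obtenirLoopA_nil (key : Int) (m : Nat) (tk tv : List Int) :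
    obtenirLoopA key m [] tk tv = none := by
  cases m with
  | zero => rfl
  | succ m => simp [obtenirLoopA, PySem.List.pop?]

theorem pop?_nil_int : PySem.List.pop? ([] : List Int) = none := by decide

-- Loop invariant: after i completed iterations A's remaining stack is the first
-- (rest.length - 2*i) elements of the body, and A's next pops read exactly the
-- entries B indexes at -2-2*i and -3-2*i in the untouched list rest ++ [n].
theorem loop_eq (key n : Int) (rest : List Int) :
    ∀ (m i : Nat) (tk tv : List Int),
      obtenirLoopA key m (rest.take (rest.length - 2 * i)) tk tv
        = obtenirLoopB (rest ++ [n]) key m i := by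
  intro m
  induction m with
  | zero => intro i tk tv; rfl
  | succ m ih =>
    intro i tk tv
    by_cases h : 2 * i < rest.length
    · -- the key at scan position i exists in both versions
      obtain ⟨j, hjdef⟩ : ∃ j, rest.length - 1 - 2 * i = j := ⟨_, rfl⟩
      have hj : rest.length - 2 * i = j + 1 := by omega
      have hjlt : j < rest.length := by omega
      have htake : rest.take (rest.length - 2 * i) = rest.take j ++ [rest[j]] := by
        rw [hj, List.take_add_one, List.getElem?_eq_getElem hjlt]; rfl
      have hk2 : (-2 - 2 * (i : Int)) = -(((2 * i + 2 : Nat) : Int)) := by push_cast; ring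
      have hget2 : PySem.List.pyGet? (rest ++ [n]) (-2 - 2 * (i : Int)) = some rest[j] := by
        rw [hk2, PySem.List.pyGet?_neg_natCast (rest ++ [n]) (2 * i + 2) (by omega) (by simp; omega)]
        have hlen : (rest ++ [n]).length - (2 * i + 2) = j := by simp; omega
        rw [hlen, List.getElem?_append_left hjlt, List.getElem?_eq_getElem hjlt]
      rw [htake]
      simp only [obtenirLoopA, obtenirLoopB, PySem.List.pop?_last, hget2]
      by_cases hcle : rest[j] = key
      · -- match: A pops the value, B reads it at -3-2*i
        rw [if_pos hcle]
        by_cases hj0 : j = 0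
        · -- no value below the matched key: both Pythons raise, both ports give none
          have htj : rest.take j = [] := by rw [hj0, List.take_zero]
          rw [htj, pop?_nil_int]
          have hnone : PySem.List.pyGet? (rest ++ [n]) (-3 - 2 * (i : Int)) = none := by
            rw [PySem.List.pyGet?_eq_none_iff]
            simp [PySem.Raise.InRange]; omega
          rw [hnone]
        · have hj1 : j = (j - 1) + 1 := by omega
          have hjm : j - 1 < rest.length := by omega
          have htake1 : rest.take j = rest.take (j - 1) ++ [rest[j - 1]] := by
            conv_lhs => rw [hj1]
            rw [List.take_add_one, List.getElem?_eq_getElem hjm]; rfl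
          have hk3 : (-3 - 2 * (i : Int)) = -(((2 * i + 3 : Nat) : Int)) := by push_cast; ring
          have hget3 : PySem.List.pyGet? (rest ++ [n]) (-3 - 2 * (i : Int)) = some rest[j - 1] := by
            rw [hk3, PySem.List.pyGet?_neg_natCast (rest ++ [n]) (2 * i + 3) (by omega) (by simp; omega)]
            have hlen : (rest ++ [n]).length - (2 * i + 3) = j - 1 := by simp; omega
            rw [hlen, List.getElem?_append_left hjm, List.getElem?_eq_getElem hjm]
          rw [htake1, hget3, PySem.List.pop?_last]
          simp [hcle]
      · -- no match: A pops the value and recurses; B moves to index i+1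
        rw [if_neg hcle]
        by_cases hj0 : j = 0
        · have htj : rest.take j = [] := by rw [hj0, List.take_zero]
          rw [htj, pop?_nil_int]
          have h1 : rest.length - 2 * (i + 1) = 0 := by omega
          have hIH := ih (i + 1) tk tv
          rw [h1, List.take_zero, obtenirLoopA_nil] at hIH
          rw [← hIH]
        · have hj1 : j = (j - 1) + 1 := by omega
          have hjm : j - 1 < rest.length := by omega
          have htake1 : rest.take j = rest.take (j - 1) ++ [rest[j - 1]] := by
            conv_lhs => rw [hj1]
            rw [List.take_add_one, List.getElem?_eq_getElem hjm]; rfl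
          rw [htake1, PySem.List.pop?_last]
          have h1 : rest.length - 2 * (i + 1) = j - 1 := by omega
          have hIH := ih (i + 1) (tk ++ [rest[j]]) (tv ++ [rest[j - 1]])
          rw [h1] at hIH
          simpa [hcle] using hIH
    · -- scan position i is past the stack: A's pop and B's index both fail
      have h0 : rest.length - 2 * i = 0 := by omega
      rw [h0, List.take_zero]
      have hB : PySem.List.pyGet? (rest ++ [n]) (-2 - 2 * (i : Int)) = none := by
        rw [PySem.List.pyGet?_eq_none_iff]
        simp [PySem.Raise.InRange]; omega
      simp [obtenirLoopA, obtenirLoopB, pop?_nil_int, hB]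

-- The two ports agree on EVERY input (the restore loop never changes A's return value).
theorem ports_eq (dico : List Int) (key : Int) :
    obtenir_valeur dico key = obtenir_valeur_alt dico key := by
  rcases List.eq_nil_or_concat dico with rfl | ⟨rest, n, rfl⟩
  · rfl
  · rw [List.concat_eq_append]
    have hA : PySem.List.pop? (rest ++ [n]) = some (n, rest) := PySem.List.pop?_last rest n
    have hB : PySem.List.pyGet? (rest ++ [n]) (-1) = some n :=
      PySem.List.pyGet?_neg_one_append_singleton rest n
    unfold obtenir_valeur obtenir_valeur_alt
    rw [hA, hB]
    have := loop_eq key n rest n.toNat 0 [] []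
    simpa using this

-- ===== VERDICT (by name: the statement is the Claim_ definition above) =====
theorem obtenir_valeur_spec : Claim_equal_obtenir_valeur := by
  intro dico key _ _
  unfold Spec_obtenir_valeur
  exact ports_eq dico key
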